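-- pv_equiv track=rewrite | github.com/mousomer/tet4d | src/tet4d/engine/gameplay/exploration_mode.py | _span_by_axis
-- ===== SOURCE A (Python) =====
-- from typing import Iterable, Sequence
--
-- def _span_by_axis(blocks: Iterable[Sequence[int]], ndim: int) -> list[int]:
--     mins = [10**9] * ndim
--     maxs = [-(10**9)] * ndim
--     count = 0
--     for block in blocks:
--         count += 1
--         for axis in range(ndim):
--             value = int(block[axis])
--             mins[axis] = min(mins[axis], value)
--             maxs[axis] = max(maxs[axis], value)
--     if count == 0:
--         return [1] * ndim
--     return [maxs[axis] - mins[axis] + 1 for axis in range(ndim)]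
-- ===== SOURCE B (Python) =====
-- from typing import Iterable, Sequence
--
-- def _span_by_axis(blocks: Iterable[Sequence[int]], ndim: int) -> list[int]:
--     bs = list(blocks)
--     if not bs:
--         return [1] * ndim
--     spans = []
--     for axis in range(ndim):
--         vals = [int(b[axis]) for b in bs]
--         spans.append(max(vals) - min(vals) + 1)
--     return spans
-- ===== Notes on version B (the rewrite author's own statement) =====
-- stated objective: alternative
-- what changed: Axis-major: materialize the blocks once and compute each axis's span with real min/max passes, instead of A's block-major single pass threading running mins/maxs lists and a count; B has no +/-10**9 sentinels.
-- intended difference: On nonempty block lists where, on some axis below ndim, every coordinate exceeds 10**9 (or every one is below -10**9), A's sentinel initial min 10**9 (resp. max -10**9) survives and A returns a corrupted span such as 1000000001, while B returns the true max-min+1, which is the intended span. — e.g. on _span_by_axis([[2000000000]], 1): A returns [1000000001], B returns [1]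
import Mathlib
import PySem

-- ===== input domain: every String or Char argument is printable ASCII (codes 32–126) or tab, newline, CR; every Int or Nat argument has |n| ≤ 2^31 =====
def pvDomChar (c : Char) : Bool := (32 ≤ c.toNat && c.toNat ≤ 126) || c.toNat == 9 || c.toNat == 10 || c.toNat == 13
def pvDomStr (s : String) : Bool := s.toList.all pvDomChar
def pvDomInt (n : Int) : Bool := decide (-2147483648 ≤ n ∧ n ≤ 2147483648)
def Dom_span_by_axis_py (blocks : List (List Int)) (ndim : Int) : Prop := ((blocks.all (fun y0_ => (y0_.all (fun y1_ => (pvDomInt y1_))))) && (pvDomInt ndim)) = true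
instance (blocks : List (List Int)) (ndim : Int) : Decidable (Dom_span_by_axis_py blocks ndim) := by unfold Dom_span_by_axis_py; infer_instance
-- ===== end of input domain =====

-- B replaces A's block-major running-min/max pass (with ±10^9 sentinels) by axis-major
-- true min/max passes; equivalence is about the return value only (objective: alternative).

-- ===== PORT A =====
-- helper: the body of A's 'for block in blocks' loop (inner 'for axis in range(ndim)' fold)
def spanA_step (ndim : Int) (s : List Int × List Int × Int) (block : List Int) :
    List Int × List Int × Int :=
  let t := (PySem.List.pyRange 0 ndim 1).foldl (fun (t : List Int × List Int) axis =>
      let value := PySem.List.pyGetD block axis 0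
      (t.1.set axis.toNat (min (PySem.List.pyGetD t.1 axis 0) value),
       t.2.set axis.toNat (max (PySem.List.pyGetD t.2 axis 0) value))) (s.1, s.2.1)
  (t.1, t.2, s.2.2 + 1)

def span_by_axis_py (blocks : List (List Int)) (ndim : Int) : List Int :=
  let mins : List Int := List.replicate ndim.toNat (10 ^ 9)
  let maxs : List Int := List.replicate ndim.toNat (-(10 ^ 9))
  let st := blocks.foldl (spanA_step ndim) (mins, maxs, (0 : Int))
  if st.2.2 = 0 then List.replicate ndim.toNat 1
  else (PySem.List.pyRange 0 ndim 1).map (fun axis =>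
    PySem.List.pyGetD st.2.1 axis 0 - PySem.List.pyGetD st.1 axis 0 + 1)

-- ===== PORT B =====
def span_by_axis_py_alt (blocks : List (List Int)) (ndim : Int) : List Int :=
  if blocks = [] then List.replicate ndim.toNat 1
  else (PySem.List.pyRange 0 ndim 1).map (fun axis =>
    let vals := blocks.map (fun b => PySem.List.pyGetD b axis 0)
    (PySem.List.max? vals (fun v => v)).getD 0 - (PySem.List.min? vals (fun v => v)).getD 0 + 1)

-- ===== PRECONDITION & SPEC =====
-- Pre_ excludes exactly the inputs where Python A raises IndexError: some block shorter than ndim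
-- (B raises there too).
def Pre_span_by_axis_py (blocks : List (List Int)) (ndim : Int) : Prop :=
  ∀ b ∈ blocks, ndim ≤ (b.length : Int)
instance (blocks : List (List Int)) (ndim : Int) : Decidable (Pre_span_by_axis_py blocks ndim) := by
  unfold Pre_span_by_axis_py; infer_instance
def pvWitness_span_by_axis_py : List (List Int) × Int := ([[1, 5], [3, 2]], 2)

-- On nonempty block lists where on some axis below ndim every coordinate exceeds 10^9 (or every
-- one is below -10^9), A's sentinel initial min 10^9 (resp. max -10^9) survives and A returns a
-- corrupted span, while B returns the true max-min+1, which is the intended span.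
def D_span_by_axis_py (blocks : List (List Int)) (ndim : Int) : Prop :=
  blocks ≠ [] ∧ ∃ a ∈ List.range (min ndim.toNat (blocks.headD []).length),
    (∀ b ∈ blocks, 10 ^ 9 < b.getD a 0) ∨ (∀ b ∈ blocks, b.getD a 0 < -(10 ^ 9))
instance (blocks : List (List Int)) (ndim : Int) : Decidable (D_span_by_axis_py blocks ndim) := by
  unfold D_span_by_axis_py; infer_instance

def Spec_span_by_axis_py (blocks : List (List Int)) (ndim : Int) (out : List Int) : Prop :=
  ¬ D_span_by_axis_py blocks ndim → out = span_by_axis_py_alt blocks ndim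
instance (blocks : List (List Int)) (ndim : Int) (out : List Int) : Decidable (Spec_span_by_axis_py blocks ndim out) := by unfold Spec_span_by_axis_py; infer_instance

def pvDiffWitness_span_by_axis_py : List (List Int) × Int := ([[2000000000]], 1)
def pvDiffWitnessOut_span_by_axis_py : (List Int) × (List Int) := ([1000000001], [1])

-- ===== CLAIM (what is proved, stated in full; the proofs are below) =====
def Claim_unchanged_span_by_axis_py : Prop := ∀ (blocks : List (List Int)) (ndim : Int), Dom_span_by_axis_py blocks ndim → Pre_span_by_axis_py blocks ndim → Spec_span_by_axis_py blocks ndim (span_by_axis_py blocks ndim)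
def Claim_changed_span_by_axis_py : Prop := Dom_span_by_axis_py (pvDiffWitness_span_by_axis_py.1) (pvDiffWitness_span_by_axis_py.2) ∧ Pre_span_by_axis_py (pvDiffWitness_span_by_axis_py.1) (pvDiffWitness_span_by_axis_py.2) ∧ D_span_by_axis_py (pvDiffWitness_span_by_axis_py.1) (pvDiffWitness_span_by_axis_py.2) ∧ span_by_axis_py (pvDiffWitness_span_by_axis_py.1) (pvDiffWitness_span_by_axis_py.2) = pvDiffWitnessOut_span_by_axis_py.1 ∧ span_by_axis_py_alt (pvDiffWitness_span_by_axis_py.1) (pvDiffWitness_span_by_axis_py.2) = pvDiffWitnessOut_span_by_axis_py.2 ∧ pvDiffWitnessOut_span_by_axis_py.1 ≠ pvDiffWitnessOut_span_by_axis_py.2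
def Claim_exact_span_by_axis_py : Prop := ∀ (blocks : List (List Int)) (ndim : Int), Dom_span_by_axis_py blocks ndim → Pre_span_by_axis_py blocks ndim → D_span_by_axis_py blocks ndim → span_by_axis_py blocks ndim ≠ span_by_axis_py_alt blocks ndim

-- ===== LEMMAS AND PROOFS =====

def valAt (b : List Int) (i : Nat) : Int := b.getD i 0

lemma step_set (m : List Int) (v : Nat → Int) (op : Int → Int → Int) (k : Nat) :
    (m.mapIdx (fun i x => if i < k then op x (v i) else x)).set k
       (op ((m.mapIdx (fun i x => if i < k then op x (v i) else x)).getD k 0) (v k))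
     = m.mapIdx (fun i x => if i < k + 1 then op x (v i) else x) := by
  by_cases hk : k < m.length
  · have hmk : (m.mapIdx (fun i x => if i < k then op x (v i) else x)).getD k 0 = m[k] := by
      rw [List.getD_eq_getElem _ _ (by simpa using hk)]
      simp
    apply List.ext_getElem (by simp)
    intro i h1 h2
    rw [List.getElem_set]
    by_cases hik : i = k
    · subst hik
      rw [if_pos rfl, hmk]
      simp
    · simp only [if_neg (Ne.symm hik), List.getElem_mapIdx]
      have : i < k ↔ i < k + 1 := by omega
      simp [this]
  · rw [List.set_eq_of_length_le (by simpa using Nat.le_of_not_lt hk)]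
    apply List.ext_getElem (by simp)
    intro i h1 h2
    simp only [List.getElem_mapIdx]
    have h3 : i < k ∧ i < k + 1 := by simp at h1; omega
    simp [h3.1, h3.2]

lemma spanA_inner_partial (block m M : List Int) (k : Nat) :
    (PySem.List.pyRange 0 (k : Int) 1).foldl
      (fun (t : List Int × List Int) axis =>
        let value := PySem.List.pyGetD block axis 0
        (t.1.set axis.toNat (min (PySem.List.pyGetD t.1 axis 0) value),
         t.2.set axis.toNat (max (PySem.List.pyGetD t.2 axis 0) value))) (m, M)
      = (m.mapIdx (fun i x => if i < k then min x (valAt block i) else x),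
         M.mapIdx (fun i x => if i < k then max x (valAt block i) else x)) := by
  induction k with
  | zero =>
    rw [PySem.List.pyRange_one_eq_nil (by norm_num)]
    refine Prod.ext ?_ ?_ <;>
      (apply List.ext_getElem (by simp); intro i h1 h2; simp)
  | succ k ih =>
    have h : PySem.List.pyRange 0 ((k + 1 : Nat) : Int) 1
        = PySem.List.pyRange 0 (k : Int) 1 ++ [(k : Int)] := by
      push_cast
      exact PySem.List.pyRange_one_succ_right (by positivity)
    rw [h, List.foldl_append, ih]
    simp only [List.foldl_cons, List.foldl_nil, PySem.List.pyGetD_natCast, Int.toNat_natCast]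
    refine Prod.ext ?_ ?_
    · simpa [valAt] using step_set m (valAt block) (fun x y => min x y) k
    · simpa [valAt] using step_set M (valAt block) (fun x y => max x y) k

lemma drop_if (m : List Int) (f : Nat → Int → Int) (k : Nat) (hk : m.length ≤ k) :
    m.mapIdx (fun i x => if i < k then f i x else x) = m.mapIdx f := by
  apply List.ext_getElem (by simp)
  intro i h1 h2
  have : i < k := by simp at h1; omega
  simp [this]

lemma spanA_step_eq (ndim : Int) (block m M : List Int) (c : Int)
    (hm : m.length = ndim.toNat) (hM : M.length = ndim.toNat) :
    spanA_step ndim (m, M, c) block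
      = (m.mapIdx (fun i x => min x (valAt block i)),
         M.mapIdx (fun i x => max x (valAt block i)), c + 1) := by
  have hnd : PySem.List.pyRange 0 ndim 1 = PySem.List.pyRange 0 ((ndim.toNat : Nat) : Int) 1 := by
    by_cases h : 0 ≤ ndim
    · rw [Int.toNat_of_nonneg h]
    · rw [PySem.List.pyRange_one_eq_nil (by omega), PySem.List.pyRange_one_eq_nil (by omega)]
  unfold spanA_step
  rw [hnd, spanA_inner_partial, drop_if _ _ _ (by simp [hm]), drop_if _ _ _ (by simp [hM])]

lemma spanA_fold (ndim : Int) (bs : List (List Int)) :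
    ∀ (m M : List Int) (c : Int), m.length = ndim.toNat → M.length = ndim.toNat →
    bs.foldl (spanA_step ndim) (m, M, c)
      = (m.mapIdx (fun i x => bs.foldl (fun acc b => min acc (valAt b i)) x),
         M.mapIdx (fun i x => bs.foldl (fun acc b => max acc (valAt b i)) x),
         c + (bs.length : Int)) := by
  induction bs with
  | nil =>
    intro m M c hm hM
    refine Prod.ext ?_ (Prod.ext ?_ ?_) <;> simp <;>
      (apply List.ext_getElem (by simp); intro i h1 h2; simp)
  | cons b bs ih =>
    intro m M c hm hM
    rw [List.foldl_cons, spanA_step_eq ndim b m M c hm hM,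
      ih _ _ _ (by simpa using hm) (by simpa using hM),
      List.mapIdx_mapIdx, List.mapIdx_mapIdx]
    refine Prod.ext rfl (Prod.ext rfl ?_)
    simp
    ring

lemma foldl_min_pull (l : List Int) (c a : Int) :
    l.foldl min (min c a) = min c (l.foldl min a) := by
  induction l generalizing a with
  | nil => simp
  | cons x t ih => simp only [List.foldl_cons, min_assoc, ih]

lemma foldl_max_pull (l : List Int) (c a : Int) :
    l.foldl max (max c a) = max c (l.foldl max a) := by
  induction l generalizing a with
  | nil => simp
  | cons x t ih => simp only [List.foldl_cons, max_assoc, ih]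

lemma span_eq_of_notD (blocks : List (List Int)) (ndim : Int)
    (hnD : ¬ D_span_by_axis_py blocks ndim) :
    span_by_axis_py blocks ndim = span_by_axis_py_alt blocks ndim := by
  match blocks with
  | [] => simp [span_by_axis_py, span_by_axis_py_alt]
  | b0 :: rest =>
    unfold span_by_axis_py span_by_axis_py_alt
    dsimp only
    rw [spanA_fold ndim (b0 :: rest) _ _ 0 (by simp) (by simp)]
    rw [if_neg (by simp; omega), if_neg (by simp)]
    apply List.map_congr_left
    intro axis ha
    obtain ⟨h0, hlt⟩ := (PySem.List.mem_pyRange_one).1 ha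
    obtain ⟨i, rfl⟩ : ∃ i : Nat, axis = (i : Int) := ⟨axis.toNat, (Int.toNat_of_nonneg h0).symm⟩
    have hin : i < ndim.toNat := by omega
    -- the two sentinel folds, read off at index i
    have hread : ∀ (init : Int) (f : Int → Int → Int),
        PySem.List.pyGetD
          ((List.replicate ndim.toNat init).mapIdx
            (fun j x => (b0 :: rest).foldl (fun acc b => f acc (valAt b j)) x)) (i : Int) 0
          = (b0 :: rest).foldl (fun acc b => f acc (valAt b i)) init := by
      intro init f
      rw [PySem.List.pyGetD_natCast, List.getD_eq_getElem _ _ (by simpa using hin)]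
      simp
    simp only [hread]
    -- B's values at axis i
    have hvals : (b0 :: rest).map (fun b => PySem.List.pyGetD b (i : Int) 0)
        = valAt b0 i :: rest.map (fun b => valAt b i) := by
      simp [valAt]
    simp only [hvals, PySem.List.max?_id_cons, PySem.List.min?_id_cons, Option.getD_some]
    -- A's folds as folds over mapped values
    have hfmin : (b0 :: rest).foldl (fun acc b => min acc (valAt b i)) (10 ^ 9)
        = min (10 ^ 9) ((rest.map (fun b => valAt b i)).foldl min (valAt b0 i)) := by
      rw [← List.foldl_map]
      simp only [List.map_cons, List.foldl_cons]
      exact foldl_min_pull _ _ _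
    have hfmax : (b0 :: rest).foldl (fun acc b => max acc (valAt b i)) (-(10 ^ 9))
        = max (-(10 ^ 9)) ((rest.map (fun b => valAt b i)).foldl max (valAt b0 i)) := by
      rw [← List.foldl_map]
      simp only [List.map_cons, List.foldl_cons]
      exact foldl_max_pull _ _ _
    rw [hfmin, hfmax]
    -- ¬D gives witnesses bounding the true min/max at axis i
    have hD : (∃ b ∈ b0 :: rest, b.getD i 0 ≤ 10 ^ 9) ∧
        (∃ b ∈ b0 :: rest, -(10 ^ 9) ≤ b.getD i 0) := by
      by_cases hib : i < b0.length
      · have hD' : ¬ ((∀ b ∈ b0 :: rest, 10 ^ 9 < b.getD i 0) ∨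
            (∀ b ∈ b0 :: rest, b.getD i 0 < -(10 ^ 9))) :=
          fun hx => hnD ⟨List.cons_ne_nil _ _, i,
            List.mem_range.2 (by simpa using lt_min hin hib), hx⟩
        push Not at hD'
        exact ⟨hD'.1.imp (fun b hb => ⟨hb.1, hb.2⟩), hD'.2.imp (fun b hb => ⟨hb.1, hb.2⟩)⟩
      · have h0 : b0.getD i 0 = 0 := List.getD_eq_default _ _ (by omega)
        exact ⟨⟨b0, List.mem_cons_self, by rw [h0]; norm_num⟩,
          ⟨b0, List.mem_cons_self, by rw [h0]; norm_num⟩⟩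
    obtain ⟨⟨bl, hbl, hble⟩, ⟨bu, hbu, hbue⟩⟩ := hD
    have hmem : ∀ b ∈ b0 :: rest,
        (rest.map (fun b => valAt b i)).foldl min (valAt b0 i) ≤ valAt b i ∧
        valAt b i ≤ (rest.map (fun b => valAt b i)).foldl max (valAt b0 i) := by
      intro b hb
      rcases List.mem_cons.1 hb with rfl | hb
      · exact ⟨(PySem.List.foldl_min_le _ _).1, (PySem.List.le_foldl_max _ _).1⟩
      · exact ⟨(PySem.List.foldl_min_le _ _).2 _ (List.mem_map_of_mem hb),
          (PySem.List.le_foldl_max _ _).2 _ (List.mem_map_of_mem hb)⟩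
    have h1 : min (10 ^ 9) ((rest.map (fun b => valAt b i)).foldl min (valAt b0 i))
        = (rest.map (fun b => valAt b i)).foldl min (valAt b0 i) :=
      min_eq_right (le_trans ((hmem bl hbl).1) (by simpa [valAt] using hble))
    have h2 : max (-(10 ^ 9)) ((rest.map (fun b => valAt b i)).foldl max (valAt b0 i))
        = (rest.map (fun b => valAt b i)).foldl max (valAt b0 i) :=
      max_eq_right (le_trans (by simpa [valAt] using hbue) ((hmem bu hbu).2))
    rw [h1, h2]

theorem tight (blocks : List (List Int)) (ndim : Int)
    (hD : D_span_by_axis_py blocks ndim) :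
    span_by_axis_py blocks ndim ≠ span_by_axis_py_alt blocks ndim := by
  obtain ⟨hne, a, har, hcase⟩ := hD
  have hin : a < ndim.toNat := by have := List.mem_range.1 har; omega
  match blocks, hne with
  | b0 :: rest, _ =>
    intro heq
    unfold span_by_axis_py span_by_axis_py_alt at heq
    dsimp only at heq
    rw [spanA_fold ndim (b0 :: rest) _ _ 0 (by simp) (by simp)] at heq
    rw [if_neg (by simp; omega), if_neg (by simp)] at heq
    have hlen : a < (PySem.List.pyRange 0 ndim 1).length := by
      rw [PySem.List.length_pyRange_one]; omega
    have hent := congrArg (fun l => l[a]?) heq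
    simp only [List.getElem?_map, List.getElem?_eq_getElem hlen, Option.map_some] at hent
    have hra : (PySem.List.pyRange 0 ndim 1)[a] = (a : Int) := by
      rw [PySem.List.getElem_pyRange_one]; ring
    rw [hra] at hent
    have hread : ∀ (init : Int) (f : Int → Int → Int),
        PySem.List.pyGetD
          ((List.replicate ndim.toNat init).mapIdx
            (fun j x => (b0 :: rest).foldl (fun acc b => f acc (valAt b j)) x)) (a : Int) 0
          = (b0 :: rest).foldl (fun acc b => f acc (valAt b a)) init := by
      intro init f
      rw [PySem.List.pyGetD_natCast, List.getD_eq_getElem _ _ (by simpa using hin)]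
      simp
    simp only [hread] at hent
    have hvals : (b0 :: rest).map (fun b => PySem.List.pyGetD b (a : Int) 0)
        = valAt b0 a :: rest.map (fun b => valAt b a) := by
      simp [valAt]
    rw [hvals] at hent
    simp only [PySem.List.max?_id_cons, PySem.List.min?_id_cons, Option.getD_some] at hent
    have hfmin : (b0 :: rest).foldl (fun acc b => min acc (valAt b a)) (10 ^ 9)
        = min (10 ^ 9) ((rest.map (fun b => valAt b a)).foldl min (valAt b0 a)) := by
      rw [← List.foldl_map]
      simp only [List.map_cons, List.foldl_cons]
      exact foldl_min_pull _ _ _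
    have hfmax : (b0 :: rest).foldl (fun acc b => max acc (valAt b a)) (-(10 ^ 9))
        = max (-(10 ^ 9)) ((rest.map (fun b => valAt b a)).foldl max (valAt b0 a)) := by
      rw [← List.foldl_map]
      simp only [List.map_cons, List.foldl_cons]
      exact foldl_max_pull _ _ _
    rw [hfmin, hfmax] at hent
    set Mn := (rest.map (fun b => valAt b a)).foldl min (valAt b0 a) with hMn
    set Mx := (rest.map (fun b => valAt b a)).foldl max (valAt b0 a) with hMx
    have hMnmem : ∃ b ∈ b0 :: rest, Mn = valAt b a := by
      rcases PySem.List.foldl_min_mem (rest.map (fun b => valAt b a)) (valAt b0 a) with h | h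
      · exact ⟨b0, List.mem_cons_self, h⟩
      · obtain ⟨b, hb, hbe⟩ := List.mem_map.1 h
        exact ⟨b, List.mem_cons_of_mem _ hb, hbe.symm⟩
    have hMxmem : ∃ b ∈ b0 :: rest, Mx = valAt b a := by
      rcases PySem.List.foldl_max_mem (rest.map (fun b => valAt b a)) (valAt b0 a) with h | h
      · exact ⟨b0, List.mem_cons_self, h⟩
      · obtain ⟨b, hb, hbe⟩ := List.mem_map.1 h
        exact ⟨b, List.mem_cons_of_mem _ hb, hbe.symm⟩
    have hle : Mn ≤ valAt b0 a ∧ valAt b0 a ≤ Mx :=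
      ⟨(PySem.List.foldl_min_le _ _).1, (PySem.List.le_foldl_max _ _).1⟩
    rcases hcase with hc | hc
    · obtain ⟨b, hb, hbe⟩ := hMnmem
      have h1 : (10 ^ 9 : Int) < Mn := by rw [hbe]; simpa [valAt] using hc b hb
      have h2 : min (10 ^ 9 : Int) Mn = 10 ^ 9 := min_eq_left (le_of_lt h1)
      have h3 : max (-(10 ^ 9) : Int) Mx = Mx := max_eq_right (by omega)
      rw [h2, h3, Option.some_inj] at hent
      omega
    · obtain ⟨b, hb, hbe⟩ := hMxmem
      have h1 : Mx < -(10 ^ 9 : Int) := by rw [hbe]; simpa [valAt] using hc b hb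
      have h2 : max (-(10 ^ 9) : Int) Mx = -(10 ^ 9) := max_eq_left (le_of_lt h1)
      have h3 : min (10 ^ 9 : Int) Mn = Mn := min_eq_right (by omega)
      rw [h2, h3, Option.some_inj] at hent
      omega

-- ===== VERDICT (by name: the statement is the Claim_ definition above) =====
theorem span_by_axis_py_spec : Claim_unchanged_span_by_axis_py := by
  intro blocks ndim _ _ hnD
  exact span_eq_of_notD blocks ndim hnD

theorem span_by_axis_py_changed : Claim_changed_span_by_axis_py := by
  unfold Claim_changed_span_by_axis_py; decide

theorem span_by_axis_py_tight : Claim_exact_span_by_axis_py := by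
  intro blocks ndim _ _ hD
  exact tight blocks ndim hD
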